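-- pv_equiv track=rewrite | github.com/LSeaburg/AOC_2024 | 08/day-8.py | get_harmonic_antinodes
-- ===== SOURCE A (Python) =====
-- def is_in_bounds(pos, map):
--   if pos[0] < 0 or pos[1] < 0:
--     return False
--   if pos[0] >= len(map[0]):
--     return False
--   if pos[1] >= len(map):
--     return False
--   return True
--
-- def get_harmonic_antinodes(ant_locs, map):
--   vector = (ant_locs[1][0] - ant_locs[0][0], ant_locs[1][1] - ant_locs[0][1])
--   a_nodes = set()
--   # Travel in negative direction
--   cur_node = ant_locs[0]
--   while(is_in_bounds(cur_node, map)):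
--     a_nodes.add(cur_node)
--     cur_node = (cur_node[0] - vector[0], cur_node[1] - vector[1])
--   # Travel in positive direction
--   cur_node = ant_locs[0]
--   while(is_in_bounds(cur_node, map)):
--     a_nodes.add(cur_node)
--     cur_node = (cur_node[0] + vector[0], cur_node[1] + vector[1])
--
--   return a_nodes
-- ===== SOURCE B (Python) =====
-- def _axis_limit(start, d, bound):
--   # largest k >= 0 keeping 0 <= start + k*d < bound on this axis; None = no constraint
--   if d > 0:
--     return (bound - 1 - start) // d
--   if d < 0:
--     return start // (-d)
--   return None
--
-- def _max_steps(sx, sy, dx, dy, cols, rows):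
--   a = _axis_limit(sx, dx, cols)
--   b = _axis_limit(sy, dy, rows)
--   if a is None:
--     return b
--   if b is None:
--     return a
--   return min(a, b)
--
-- def get_harmonic_antinodes(ant_locs, map):
--   sx, sy = ant_locs[0]
--   vx = ant_locs[1][0] - sx
--   vy = ant_locs[1][1] - sy
--   rows = len(map)
--   if sy < 0 or sy >= rows:
--     return set()
--   cols = len(map[0])
--   if sx < 0 or sx >= cols:
--     return set()
--   k_neg = _max_steps(sx, sy, -vx, -vy, cols, rows)
--   k_pos = _max_steps(sx, sy, vx, vy, cols, rows)
--   neg = [(sx - k * vx, sy - k * vy) for k in range(k_neg + 1)]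
--   pos = [(sx + k * vx, sy + k * vy) for k in range(1, k_pos + 1)]
--   return set(neg + pos)
-- ===== Notes on version B (the rewrite author's own statement) =====
-- stated objective: alternative
-- what changed: A walks the line step by step in both directions with two while loops re-testing bounds at every step; B solves the per-axis bound inequalities in closed form (floor divisions) to get the maximal step counts and emits the points with two range comprehensions.
import Mathlib
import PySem

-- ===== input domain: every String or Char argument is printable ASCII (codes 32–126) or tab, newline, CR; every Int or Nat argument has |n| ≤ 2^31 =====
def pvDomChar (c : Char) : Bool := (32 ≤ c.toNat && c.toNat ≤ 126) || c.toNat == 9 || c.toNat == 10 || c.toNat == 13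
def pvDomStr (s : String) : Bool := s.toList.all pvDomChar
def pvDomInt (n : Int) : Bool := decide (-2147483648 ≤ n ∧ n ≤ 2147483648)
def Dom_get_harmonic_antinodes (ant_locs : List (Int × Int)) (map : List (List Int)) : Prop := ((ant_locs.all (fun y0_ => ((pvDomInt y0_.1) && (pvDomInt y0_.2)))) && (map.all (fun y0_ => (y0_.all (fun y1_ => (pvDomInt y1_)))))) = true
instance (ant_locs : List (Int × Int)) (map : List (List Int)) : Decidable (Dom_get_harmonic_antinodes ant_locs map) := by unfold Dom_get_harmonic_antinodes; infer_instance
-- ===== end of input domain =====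

-- B replaces A's two boundary-walking while loops by closed-form bound arithmetic: it solves the
-- per-axis inequalities 0 <= start + k*d < bound with floor divisions and emits the line points
-- with two range comprehensions.  Objective: alternative (same cost, different algorithm).

-- ===== PORT A =====
-- is_in_bounds; map.headD [] stands for map[0]: Pre_ guarantees map ≠ [] whenever this branch is reached
def pvInB (pos : Int × Int) (map : List (List Int)) : Bool :=
  if pos.1 < 0 || pos.2 < 0 then false
  else if ((map.headD []).length : Int) ≤ pos.1 then false
  else if (map.length : Int) ≤ pos.2 then false
  else true

-- one 'while is_in_bounds: add; step' loop; fuel only makes it total (enough fuel inside Pre_)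
def pvWalkA (fuel : Nat) (cur : Int × Int) (step : Int × Int) (map : List (List Int))
    (acc : PySem.Set (Int × Int)) : PySem.Set (Int × Int) :=
  match fuel with
  | 0 => acc
  | n + 1 =>
      if pvInB cur map then
        pvWalkA n (cur.1 + step.1, cur.2 + step.2) step map (PySem.Set.add acc cur)
      else acc

def get_harmonic_antinodes (ant_locs : List (Int × Int)) (map : List (List Int)) : List (Int × Int) :=
  let a0 := (PySem.List.pyGet? ant_locs 0).getD (0, 0)
  let a1 := (PySem.List.pyGet? ant_locs 1).getD (0, 0)
  let v : Int × Int := (a1.1 - a0.1, a1.2 - a0.2)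
  let fuel := map.length + (map.headD []).length + 2
  let acc := pvWalkA fuel a0 (-v.1, -v.2) map PySem.Set.empty
  pvWalkA fuel a0 (v.1, v.2) map acc

-- ===== PORT B =====
-- _axis_limit: largest k ≥ 0 keeping 0 ≤ start + k*d < bound on one axis; none = no constraint
def pvAxisLimit (start d bound : Int) : Option Int :=
  if 0 < d then some (PySem.Int.floordiv (bound - 1 - start) d)
  else if d < 0 then some (PySem.Int.floordiv start (-d))
  else none

-- _max_steps; the none/none case is Python's TypeError (unreachable under Pre_), modelled as 0
def pvMaxSteps (sx sy dx dy cols rows : Int) : Int :=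
  match pvAxisLimit sx dx cols, pvAxisLimit sy dy rows with
  | none, b => b.getD 0
  | a, none => a.getD 0
  | some a, some b => min a b

def get_harmonic_antinodes_alt (ant_locs : List (Int × Int)) (map : List (List Int)) : List (Int × Int) :=
  let a0 := (PySem.List.pyGet? ant_locs 0).getD (0, 0)
  let a1 := (PySem.List.pyGet? ant_locs 1).getD (0, 0)
  let sx := a0.1
  let sy := a0.2
  let vx := a1.1 - sx
  let vy := a1.2 - sy
  let rows : Int := map.length
  if sy < 0 || rows ≤ sy then [] else
  let cols : Int := (map.headD []).length
  if sx < 0 || cols ≤ sx then [] else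
  let kneg := pvMaxSteps sx sy (-vx) (-vy) cols rows
  let kpos := pvMaxSteps sx sy vx vy cols rows
  let neg := (PySem.List.pyRange 0 (kneg + 1) 1).map (fun k => (sx - k * vx, sy - k * vy))
  let pos := (PySem.List.pyRange 1 (kpos + 1) 1).map (fun k => (sx + k * vx, sy + k * vy))
  PySem.Set.ofList (neg ++ pos)

-- ===== PRECONDITION & SPEC =====
-- Pre_ excludes: fewer than two antenna locations (A raises IndexError on ant_locs[1]);
-- empty map with a non-negative first antenna (A raises IndexError on map[0]);
-- coinciding antennas with the first one in bounds (A's while loop never terminates).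
def Pre_get_harmonic_antinodes (ant_locs : List (Int × Int)) (map : List (List Int)) : Prop :=
  2 ≤ ant_locs.length ∧
  (let p := ant_locs.headD (0, 0)
   let q := (ant_locs.drop 1).headD (0, 0)
   ¬(map = [] ∧ 0 ≤ p.1 ∧ 0 ≤ p.2) ∧
   ¬(p = q ∧ 0 ≤ p.1 ∧ 0 ≤ p.2 ∧ p.1 < ((map.headD []).length : Int) ∧ p.2 < (map.length : Int)))
instance (ant_locs : List (Int × Int)) (map : List (List Int)) : Decidable (Pre_get_harmonic_antinodes ant_locs map) := by
  unfold Pre_get_harmonic_antinodes; infer_instance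

def pvWitness_get_harmonic_antinodes : (List (Int × Int)) × List (List Int) :=
  ([(0, 0), (1, 1)], [[0, 0], [0, 0]])

def Spec_get_harmonic_antinodes (ant_locs : List (Int × Int)) (map : List (List Int)) (out : List (Int × Int)) : Prop := out = get_harmonic_antinodes_alt ant_locs map
instance (ant_locs : List (Int × Int)) (map : List (List Int)) (out : List (Int × Int)) : Decidable (Spec_get_harmonic_antinodes ant_locs map out) := by unfold Spec_get_harmonic_antinodes; infer_instance

-- ===== CLAIM (what is proved, stated in full; the proofs are below) =====
def Claim_equal_get_harmonic_antinodes : Prop := ∀ (ant_locs : List (Int × Int)) (map : List (List Int)), Dom_get_harmonic_antinodes ant_locs map → Pre_get_harmonic_antinodes ant_locs map → Spec_get_harmonic_antinodes ant_locs map (get_harmonic_antinodes ant_locs map)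

-- ===== LEMMAS AND PROOFS =====

-- single axis: for k ≥ 0 the axis constraint holds iff k is below the closed-form limit
theorem pv_axis_iff (s d b k : Int) (h0 : 0 ≤ s) (hb : s < b) (hk : 0 ≤ k) (hd : d ≠ 0) :
    (0 ≤ s + k * d ∧ s + k * d < b) ↔ k ≤ (pvAxisLimit s d b).getD 0 := by
  rcases lt_trichotomy d 0 with h | h | h
  · have hlim : (pvAxisLimit s d b).getD 0 = PySem.Int.floordiv s (-d) := by
      simp [pvAxisLimit, h, not_lt.mpr (le_of_lt h)]
    rw [hlim, PySem.Int.le_floordiv_iff_mul_le (by omega)]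
    constructor
    · rintro ⟨h1, _⟩; nlinarith
    · intro h1
      refine ⟨by nlinarith, ?_⟩
      have : k * d ≤ 0 := mul_nonpos_of_nonneg_of_nonpos hk (le_of_lt h)
      omega
  · exact absurd h hd
  · have hlim : (pvAxisLimit s d b).getD 0 = PySem.Int.floordiv (b - 1 - s) d := by
      simp [pvAxisLimit, h]
    rw [hlim, PySem.Int.le_floordiv_iff_mul_le h]
    constructor
    · rintro ⟨_, h2⟩; nlinarith
    · intro h1
      refine ⟨?_, by nlinarith⟩
      have : 0 ≤ k * d := mul_nonneg hk (le_of_lt h)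
      omega

theorem pv_floordiv_le (a b : Int) (ha : 0 ≤ a) (hb : 0 < b) :
    PySem.Int.floordiv a b ≤ a := by
  rw [PySem.Int.floordiv_eq_ediv_of_pos hb]
  exact Int.ediv_le_self b ha

-- a nonzero direction always yields a limit, and (inside the grid) it is at most the bound
theorem pv_axisLimit_some (s d b : Int) (h0 : 0 ≤ s) (hb : s < b) (hd : d ≠ 0) :
    ∃ z, pvAxisLimit s d b = some z ∧ z ≤ b := by
  rcases lt_trichotomy d 0 with h | h | h
  · refine ⟨PySem.Int.floordiv s (-d), by simp [pvAxisLimit, h, not_lt.mpr (le_of_lt h)], ?_⟩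
    have := pv_floordiv_le s (-d) h0 (by omega); omega
  · exact absurd h hd
  · refine ⟨PySem.Int.floordiv (b - 1 - s) d, by simp [pvAxisLimit, h], ?_⟩
    have := pv_floordiv_le (b - 1 - s) d (by omega) h; omega

theorem pv_axisLimit_zero (s b : Int) : pvAxisLimit s 0 b = none := by
  simp [pvAxisLimit]

-- bounds check at s + k·d, for k ≥ 0, as a comparison against pvMaxSteps
theorem pv_inb_iff (m : List (List Int)) (sx sy dx dy k : Int)
    (hsx : 0 ≤ sx) (hsy : 0 ≤ sy)
    (hcx : sx < ((m.headD []).length : Int)) (hcy : sy < (m.length : Int))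
    (hk : 0 ≤ k) (hd : ¬(dx = 0 ∧ dy = 0)) :
    pvInB (sx + k * dx, sy + k * dy) m = true ↔
      k ≤ pvMaxSteps sx sy dx dy ((m.headD []).length : Int) (m.length : Int) := by
  set cols : Int := ((m.headD []).length : Int) with hc
  set rows : Int := (m.length : Int) with hr
  have hinb : pvInB (sx + k * dx, sy + k * dy) m = true ↔
      ((0 ≤ sx + k * dx ∧ sx + k * dx < cols) ∧ (0 ≤ sy + k * dy ∧ sy + k * dy < rows)) := by
    simp only [pvInB, ← hc, ← hr]
    split_ifs with h1 h2 h3 <;> simp_all <;> omega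
  rw [hinb]
  by_cases hdx : dx = 0
  · have hdy : dy ≠ 0 := fun h => hd ⟨hdx, h⟩
    obtain ⟨z, hz, _⟩ := pv_axisLimit_some sy dy rows hsy hcy hdy
    have hmax : pvMaxSteps sx sy dx dy cols rows = z := by
      subst hdx; simp [pvMaxSteps, pv_axisLimit_zero, hz]
    have hy := pv_axis_iff sy dy rows k hsy hcy hk hdy
    rw [hz, Option.getD_some] at hy
    rw [hmax, ← hy]
    subst hdx
    constructor
    · rintro ⟨_, h2⟩; exact h2
    · intro h2; exact ⟨by simpa using ⟨hsx, hcx⟩, h2⟩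
  · by_cases hdy : dy = 0
    · obtain ⟨z, hz, _⟩ := pv_axisLimit_some sx dx cols hsx hcx hdx
      have hmax : pvMaxSteps sx sy dx dy cols rows = z := by
        subst hdy; simp [pvMaxSteps, pv_axisLimit_zero, hz]
      have hx := pv_axis_iff sx dx cols k hsx hcx hk hdx
      rw [hz, Option.getD_some] at hx
      rw [hmax, ← hx]
      subst hdy
      constructor
      · rintro ⟨h1, _⟩; exact h1
      · intro h1; exact ⟨h1, by simpa using ⟨hsy, hcy⟩⟩
    · obtain ⟨a, ha, _⟩ := pv_axisLimit_some sx dx cols hsx hcx hdx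
      obtain ⟨b, hb, _⟩ := pv_axisLimit_some sy dy rows hsy hcy hdy
      have hmax : pvMaxSteps sx sy dx dy cols rows = min a b := by
        simp [pvMaxSteps, ha, hb]
      have hx := pv_axis_iff sx dx cols k hsx hcx hk hdx
      have hy := pv_axis_iff sy dy rows k hsy hcy hk hdy
      rw [ha, Option.getD_some] at hx; rw [hb, Option.getD_some] at hy
      rw [hmax, le_min_iff, ← hx, ← hy]

-- the while loop collects exactly the first K+1 multiples when point K is in bounds and K+1 is not
theorem pv_walk_char (m : List (List Int)) (dx dy : Int) :
    ∀ (K : Nat) (sx sy : Int) (fuel : Nat) (acc : PySem.Set (Int × Int)),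
    K + 2 ≤ fuel →
    (∀ k : Nat, k ≤ K → pvInB (sx + k * dx, sy + k * dy) m = true) →
    pvInB (sx + (K + 1 : Nat) * dx, sy + (K + 1 : Nat) * dy) m = false →
    pvWalkA fuel (sx, sy) (dx, dy) m acc =
      ((List.range (K + 1)).map (fun (k : Nat) => (sx + (k : Int) * dx, sy + (k : Int) * dy))).foldl PySem.Set.add acc := by
  intro K
  induction K with
  | zero =>
    intro sx sy fuel acc hf hin hout
    obtain ⟨f, rfl⟩ : ∃ f, fuel = f + 2 := ⟨fuel - 2, by omega⟩
    have h0 : pvInB (sx, sy) m = true := by simpa using hin 0 (le_refl 0)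
    have h1 : pvInB (sx + dx, sy + dy) m = false := by simpa using hout
    simp [pvWalkA, h0, h1]
  | succ K ih =>
    intro sx sy fuel acc hf hin hout
    obtain ⟨f, rfl⟩ : ∃ f, fuel = f + 1 := ⟨fuel - 1, by omega⟩
    have h0 : pvInB (sx, sy) m = true := by simpa using hin 0 (by omega)
    have step : pvWalkA (f + 1) (sx, sy) (dx, dy) m acc =
        pvWalkA f (sx + dx, sy + dy) (dx, dy) m (PySem.Set.add acc (sx, sy)) := by
      simp [pvWalkA, h0]
    rw [step, ih (sx + dx) (sy + dy) f (PySem.Set.add acc (sx, sy)) (by omega)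
      (fun k hk => by
        have := hin (k + 1) (by omega)
        push_cast at this ⊢
        convert this using 3 <;> ring)
      (by
        have := hout
        push_cast at this ⊢
        convert this using 3 <;> ring)]
    rw [show List.range (K + 1 + 1) = 0 :: List.map Nat.succ (List.range (K + 1)) from
      List.range_succ_eq_map, List.map_cons, List.foldl_cons]
    rw [show ((List.range (K + 1)).map Nat.succ).map
          (fun (k : Nat) => ((sx + (k : Int) * dx, sy + (k : Int) * dy) : Int × Int)) =
        (List.range (K + 1)).map
          (fun (k : Nat) => ((sx + dx + (k : Int) * dx, sy + dy + (k : Int) * dy) : Int × Int)) from by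
      rw [List.map_map]
      refine List.map_congr_left fun a _ => ?_
      simp only [Function.comp, Nat.succ_eq_add_one, Prod.mk.injEq]
      constructor <;> push_cast <;> ring]
    simp

-- the closed-form step count is bounded by the grid perimeter (gives enough fuel)
theorem pv_maxSteps_le (sx sy dx dy cols rows : Int)
    (hsx : 0 ≤ sx) (hsy : 0 ≤ sy) (hcx : sx < cols) (hcy : sy < rows)
    (hd : ¬(dx = 0 ∧ dy = 0)) :
    pvMaxSteps sx sy dx dy cols rows ≤ cols + rows := by
  by_cases hdx : dx = 0
  · have hdy : dy ≠ 0 := fun h => hd ⟨hdx, h⟩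
    obtain ⟨z, hz, hle⟩ := pv_axisLimit_some sy dy rows hsy hcy hdy
    subst hdx
    simp [pvMaxSteps, pv_axisLimit_zero, hz]
    omega
  · by_cases hdy : dy = 0
    · obtain ⟨z, hz, hle⟩ := pv_axisLimit_some sx dx cols hsx hcx hdx
      subst hdy
      simp [pvMaxSteps, pv_axisLimit_zero, hz]
      omega
    · obtain ⟨a, ha, hia⟩ := pv_axisLimit_some sx dx cols hsx hcx hdx
      obtain ⟨b, hb, hib⟩ := pv_axisLimit_some sy dy rows hsy hcy hdy
      simp [pvMaxSteps, ha, hb]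
      omega

-- adding an element already present leaves the set unchanged
theorem pv_set_add_mem (s : PySem.Set (Int × Int)) (x : Int × Int) (h : x ∈ s) :
    PySem.Set.add s x = s := by
  simp [PySem.Set.add, PySem.Set.contains, h]

theorem pv_walk_stop (fuel : Nat) (c d : Int × Int) (m : List (List Int))
    (acc : PySem.Set (Int × Int)) (h : pvInB c m = false) :
    pvWalkA fuel c d m acc = acc := by
  cases fuel <;> simp [pvWalkA, h]

theorem pv_inb_spec (m : List (List Int)) (x y : Int) :
    pvInB (x, y) m = true ↔
      (0 ≤ x ∧ 0 ≤ y ∧ x < ((m.headD []).length : Int) ∧ y < (m.length : Int)) := by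
  simp only [pvInB]
  split_ifs with h1 h2 h3 <;> simp_all <;> omega

theorem pv_core (sx sy qx qy : Int) (rest : List (Int × Int)) (m : List (List Int))
    (hpre2 : ¬((sx, sy) = ((qx, qy) : Int × Int) ∧ 0 ≤ sx ∧ 0 ≤ sy ∧
      sx < ((m.headD []).length : Int) ∧ sy < (m.length : Int))) :
    get_harmonic_antinodes ((sx, sy) :: (qx, qy) :: rest) m =
      get_harmonic_antinodes_alt ((sx, sy) :: (qx, qy) :: rest) m := by
  have hg0 : PySem.List.pyGet? (((sx, sy) : Int × Int) :: (qx, qy) :: rest) 0 = some (sx, sy) := by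
    simp [PySem.List.pyGet?, PySem.List.pyIdx?, show (0:Int) ≤ (rest.length : Int) + 1 by positivity]
  have hg1 : PySem.List.pyGet? (((sx, sy) : Int × Int) :: (qx, qy) :: rest) 1 = some (qx, qy) := by
    simp [PySem.List.pyGet?, PySem.List.pyIdx?, show (0:Int) ≤ (rest.length : Int) + 1 by positivity]
  simp only [get_harmonic_antinodes, get_harmonic_antinodes_alt, hg0, hg1, Option.getD_some]
  by_cases hin : pvInB (sx, sy) m = true
  · obtain ⟨hsx, hsy, hcx, hcy⟩ := (pv_inb_spec m sx sy).mp hin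
    have hd : ¬(qx - sx = 0 ∧ qy - sy = 0) := by
      rintro ⟨h1, h2⟩
      exact hpre2 ⟨by simp only [Prod.mk.injEq]; omega, hsx, hsy, hcx, hcy⟩
    have hdneg : ¬(-(qx - sx) = 0 ∧ -(qy - sy) = 0) := by omega
    have hKn0 : 0 ≤ pvMaxSteps sx sy (-(qx - sx)) (-(qy - sy)) ((m.headD []).length : Int) (m.length : Int) := by
      have h0 : pvInB (sx + 0 * (-(qx - sx)), sy + 0 * (-(qy - sy))) m = true := by simpa using hin
      simpa using (pv_inb_iff m sx sy (-(qx - sx)) (-(qy - sy)) 0 hsx hsy hcx hcy le_rfl hdneg).mp h0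
    have hKp0 : 0 ≤ pvMaxSteps sx sy (qx - sx) (qy - sy) ((m.headD []).length : Int) (m.length : Int) := by
      have h0 : pvInB (sx + 0 * (qx - sx), sy + 0 * (qy - sy)) m = true := by simpa using hin
      simpa using (pv_inb_iff m sx sy (qx - sx) (qy - sy) 0 hsx hsy hcx hcy le_rfl hd).mp h0
    have hKnle := pv_maxSteps_le sx sy (-(qx - sx)) (-(qy - sy)) _ _ hsx hsy hcx hcy hdneg
    have hKple := pv_maxSteps_le sx sy (qx - sx) (qy - sy) _ _ hsx hsy hcx hcy hd
    rw [pv_walk_char m (-(qx - sx)) (-(qy - sy))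
        (pvMaxSteps sx sy (-(qx - sx)) (-(qy - sy)) ((m.headD []).length : Int) (m.length : Int)).toNat
        sx sy (m.length + (m.headD []).length + 2) _ (by omega)
        (fun k hk => (pv_inb_iff m sx sy _ _ (k : Int) hsx hsy hcx hcy (by positivity) hdneg).mpr (by omega))
        (by
          rw [← Bool.not_eq_true]
          intro h
          have := (pv_inb_iff m sx sy _ _
            (((pvMaxSteps sx sy (-(qx - sx)) (-(qy - sy)) ((m.headD []).length : Int) (m.length : Int)).toNat + 1 : Nat) : Int)
            hsx hsy hcx hcy (by positivity) hdneg).mp h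
          omega)]
    rw [pv_walk_char m (qx - sx) (qy - sy)
        (pvMaxSteps sx sy (qx - sx) (qy - sy) ((m.headD []).length : Int) (m.length : Int)).toNat
        sx sy (m.length + (m.headD []).length + 2) _ (by omega)
        (fun k hk => (pv_inb_iff m sx sy _ _ (k : Int) hsx hsy hcx hcy (by positivity) hd).mpr (by omega))
        (by
          rw [← Bool.not_eq_true]
          intro h
          have := (pv_inb_iff m sx sy _ _
            (((pvMaxSteps sx sy (qx - sx) (qy - sy) ((m.headD []).length : Int) (m.length : Int)).toNat + 1 : Nat) : Int)
            hsx hsy hcx hcy (by positivity) hd).mp h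
          omega)]
    rw [if_neg (by simp only [Bool.or_eq_true, decide_eq_true_eq]; omega),
        if_neg (by simp only [Bool.or_eq_true, decide_eq_true_eq]; omega)]
    rw [PySem.List.pyRange_one, PySem.List.pyRange_one]
    rw [show ((pvMaxSteps sx sy (-(qx - sx)) (-(qy - sy)) ((m.headD []).length : Int) (m.length : Int) + 1) - (0:Int)).toNat
          = (pvMaxSteps sx sy (-(qx - sx)) (-(qy - sy)) ((m.headD []).length : Int) (m.length : Int)).toNat + 1 from by omega,
        show ((pvMaxSteps sx sy (qx - sx) (qy - sy) ((m.headD []).length : Int) (m.length : Int) + 1) - (1:Int)).toNat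
          = (pvMaxSteps sx sy (qx - sx) (qy - sy) ((m.headD []).length : Int) (m.length : Int)).toNat from by omega]
    rw [List.map_map, List.map_map]
    rw [PySem.Set.ofList_eq_foldl, List.foldl_append]
    rw [show List.range ((pvMaxSteps sx sy (qx - sx) (qy - sy) ((m.headD []).length : Int) (m.length : Int)).toNat + 1)
          = 0 :: List.map Nat.succ (List.range (pvMaxSteps sx sy (qx - sx) (qy - sy) ((m.headD []).length : Int) (m.length : Int)).toNat)
        from List.range_succ_eq_map]
    simp only [List.map_cons, List.foldl_cons, List.map_map]
    have hmem : ((sx + ((0:Nat):Int) * (qx - sx), sy + ((0:Nat):Int) * (qy - sy)) : Int × Int) ∈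
        List.foldl PySem.Set.add PySem.Set.empty
          (List.map (fun k : Nat => ((sx + (k:Int) * -(qx - sx), sy + (k:Int) * -(qy - sy)) : Int × Int))
            (List.range ((pvMaxSteps sx sy (-(qx - sx)) (-(qy - sy)) ((m.headD []).length : Int) (m.length : Int)).toNat + 1))) := by
      rw [show (PySem.Set.empty : PySem.Set (Int × Int)) = [] from rfl, ← PySem.Set.ofList_eq_foldl,
        PySem.Set.mem_ofList]
      exact List.mem_map.mpr ⟨0, by simp, by simp⟩
    rw [pv_set_add_mem _ _ hmem]
    congr 1
    · congr 1
      refine List.map_congr_left fun a _ => ?_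
      simp only [Function.comp_apply, Prod.mk.injEq]
      constructor <;> push_cast <;> ring
    · refine List.map_congr_left fun a _ => ?_
      simp only [Function.comp_apply, Prod.mk.injEq]
      constructor <;> push_cast <;> ring
  · have hin' : pvInB (sx, sy) m = false := by
      cases h : pvInB (sx, sy) m
      · rfl
      · exact absurd h hin
    have hnb : ¬(0 ≤ sx ∧ 0 ≤ sy ∧ sx < ((m.headD []).length : Int) ∧ sy < (m.length : Int)) :=
      fun h => hin ((pv_inb_spec m sx sy).mpr h)
    rw [pv_walk_stop _ _ _ _ _ hin', pv_walk_stop _ _ _ _ _ hin']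
    by_cases hy : sy < 0 ∨ (m.length : Int) ≤ sy
    · rw [if_pos (show (decide (sy < 0) || decide ((m.length : Int) ≤ sy)) = true by simpa using hy)]
      rfl
    · rw [if_neg (show ¬((decide (sy < 0) || decide ((m.length : Int) ≤ sy)) = true) by simpa using hy),
          if_pos (show (decide (sx < 0) || decide (((m.headD []).length : Int) ≤ sx)) = true by
            simp only [Bool.or_eq_true, decide_eq_true_eq]; omega)]
      rfl

-- ===== VERDICT (by name: the statement is the Claim_ definition above) =====
theorem get_harmonic_antinodes_spec : Claim_equal_get_harmonic_antinodes := by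
  intro ant_locs map _ hpre
  unfold Spec_get_harmonic_antinodes
  obtain ⟨hlen, _, hpre2⟩ := hpre
  rcases ant_locs with _ | ⟨⟨sx, sy⟩, _ | ⟨⟨qx, qy⟩, rest⟩⟩
  · simp at hlen
  · simp at hlen
  · exact pv_core sx sy qx qy rest map (by simpa using hpre2)
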